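-- pv_equiv track=rewrite | github.com/mamingsuper/Skills4SocialScience | scripts/opencli_adapter.py | _match_subcategory
-- ===== SOURCE A (Python) =====
-- from typing import Dict, List, Optional
--
-- def _match_subcategory(text: str, subcategories: Dict[str, List[str]], default: str) -> str:
--     """Find the best matching subcategory by keyword hits."""
--     best_key = default
--     best_hits = 0
--     for key, signals in subcategories.items():
--         hits = sum(1 for s in signals if s in text)
--         if hits > best_hits:
--             best_hits = hits
--             best_key = key
--     return best_key
-- ===== SOURCE B (Python) =====
-- def _match_subcategory(text: str, subcategories, default: str) -> str:
--     """Find the best matching subcategory by keyword hits."""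
--     items = list(subcategories.items())
--     scores = [sum(s in text for s in signals) for _, signals in items]
--     best = max(scores, default=0)
--     if best == 0:
--         return default
--     return items[scores.index(best)][0]
-- ===== Notes on version B (the rewrite author's own statement) =====
-- stated objective: idiomatic
-- what changed: Replaces A's single running-best accumulator loop (strict-improvement updates to best_key/best_hits) by a two-pass decomposition: build the list of scores, take max(scores, default=0), and return the key at the first index of that maximum (ties resolved identically to A's strict '>').
import Mathlib
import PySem

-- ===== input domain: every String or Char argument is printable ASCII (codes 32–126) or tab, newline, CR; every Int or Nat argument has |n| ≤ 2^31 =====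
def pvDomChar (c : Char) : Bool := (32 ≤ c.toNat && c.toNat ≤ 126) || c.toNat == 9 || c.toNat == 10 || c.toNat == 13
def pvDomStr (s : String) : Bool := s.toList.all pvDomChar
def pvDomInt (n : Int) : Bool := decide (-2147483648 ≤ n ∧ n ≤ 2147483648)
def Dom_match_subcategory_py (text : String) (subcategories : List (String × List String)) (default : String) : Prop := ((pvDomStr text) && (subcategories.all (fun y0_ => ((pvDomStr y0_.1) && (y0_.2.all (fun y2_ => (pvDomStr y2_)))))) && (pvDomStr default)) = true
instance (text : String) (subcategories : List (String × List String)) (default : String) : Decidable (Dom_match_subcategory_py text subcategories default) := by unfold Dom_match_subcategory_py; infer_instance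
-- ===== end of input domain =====

-- B replaces A's running-best accumulator loop by a two-pass map/max/first-index
-- decomposition (objective: idiomatic); same return value on every input, both total.

-- ===== PORT A =====
-- literal transliteration of A: one fold carrying the running (best_key, best_hits) pair;
-- per key, hits = sum(1 for s in signals if s in text) is the inner fold of pvStepA.
def pvStepA (text : String) (st : String × Int) (kv : String × List String) : String × Int :=
  let hits : Int := kv.2.foldl (fun acc s => if PySem.Str.isIn s text then acc + 1 else acc) 0
  if hits > st.2 then (kv.1, hits) else st

def match_subcategory_py (text : String) (subcategories : List (String × List String)) (default : String) : String :=
  (subcategories.foldl (pvStepA text) (default, 0)).1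

-- ===== PORT B =====
-- literal transliteration of Source B: scores list, max (default 0), first index of the max.
def match_subcategory_py_alt (text : String) (subcategories : List (String × List String)) (default : String) : String :=
  let scores : List Int := subcategories.map (fun kv => (kv.2.countP (fun s => PySem.Str.isIn s text) : Int))
  let best : Int := match PySem.List.max? scores (fun y => y) with | none => 0 | some m => m
  if best = 0 then default
  else
    match PySem.List.index? scores best with
    | some i => (subcategories.getD i (default, [])).1
    | none => default   -- unreachable: best > 0 is an element of scores

-- ===== PRECONDITION & SPEC =====
def Spec_match_subcategory_py (text : String) (subcategories : List (String × List String)) (default : String) (out : String) : Prop := out = match_subcategory_py_alt text subcategories default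
instance (text : String) (subcategories : List (String × List String)) (default : String) (out : String) : Decidable (Spec_match_subcategory_py text subcategories default out) := by unfold Spec_match_subcategory_py; infer_instance

-- ===== CLAIM (what is proved, stated in full; the proofs are below) =====
def Claim_equal_match_subcategory_py : Prop := ∀ (text : String) (subcategories : List (String × List String)) (default : String), Dom_match_subcategory_py text subcategories default → Spec_match_subcategory_py text subcategories default (match_subcategory_py text subcategories default)

-- ===== LEMMAS AND PROOFS =====

-- score of one (key, signals) pair, shared by both analyses
def pvScore (text : String) (kv : String × List String) : Int :=
  (kv.2.countP (fun s => PySem.Str.isIn s text) : Int)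

-- A's step, expressed through pvScore (the inner fold is the countP, by foldl_if_add_one)
lemma pvStepA_spec (text : String) (k : String) (h : Int) (kv : String × List String) :
    pvStepA text (k, h) kv = if pvScore text kv > h then (kv.1, pvScore text kv) else (k, h) := by
  have := PySem.List.foldl_if_add_one (fun s => PySem.Str.isIn s text) kv.2 0
  simp [pvStepA, pvScore] at this ⊢
  rw [this]

-- a first index found on a mapped scores list is in bounds
lemma pvIdx_lt {v : Int} {l : List (String × List String)} {f : String × List String → Int} {i : Nat}
    (h : PySem.List.index? (l.map f) v = some i) : i < l.length := by
  obtain ⟨pre, suf, hsplit, hlen, -⟩ := (PySem.List.index?_eq_some_iff _ _ _).mp h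
  have := congrArg List.length hsplit
  simp at this
  omega

-- first index of v in (x :: xs) when v ≠ x
lemma pvIdx_cons {x v : Int} {xs : List Int} {j : Nat} (hne : ¬ v = x)
    (hj : PySem.List.index? xs v = some j) :
    PySem.List.index? (x :: xs) v = some (j + 1) := by
  rw [PySem.List.index?_eq_idxOf?, List.idxOf?_cons, if_neg (by simp only [beq_iff_eq]; exact fun h => hne h.symm),
    ← PySem.List.index?_eq_idxOf?, hj]
  rfl

-- loop invariant: A's fold from state (k, h) returns the first key whose score equals
-- the running max (floored at h) of the remaining scores, or k if nothing exceeds h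
lemma pvLoop_eq (text : String) (l : List (String × List String)) :
    ∀ (k : String) (h : Int),
      l.foldl (pvStepA text) (k, h)
      = ((if (l.map (pvScore text)).foldl max h = h then k
          else match PySem.List.index? (l.map (pvScore text)) ((l.map (pvScore text)).foldl max h) with
               | some i => (l.getD i (k, [])).1
               | none => k),
         (l.map (pvScore text)).foldl max h) := by
  induction l with
  | nil => intro k h; simp
  | cons p t ih =>
    intro k h
    rw [List.foldl_cons, List.map_cons, List.foldl_cons, pvStepA_spec]
    by_cases hgt : pvScore text p > h
    · rw [if_pos hgt, ih, show max h (pvScore text p) = pvScore text p from by omega]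
      set fp := pvScore text p with hfp
      set best := (t.map (pvScore text)).foldl max fp with hb
      have hlef : fp ≤ best := (PySem.List.le_foldl_max _ _).1
      rw [if_neg (show ¬ best = h from by omega)]
      by_cases hbfp : best = fp
      · rw [if_pos hbfp]
        have h0 : PySem.List.index? (fp :: t.map (pvScore text)) best = some 0 := by
          rw [PySem.List.index?_eq_idxOf?, List.idxOf?_cons]; simp [hbfp]
        rw [h0]
        simp
      · rw [if_neg hbfp]
        have hbmem : best ∈ t.map (pvScore text) := (PySem.List.foldl_max_mem _ _).resolve_left hbfp
        obtain ⟨j, hj⟩ := Option.ne_none_iff_exists'.mp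
          (show PySem.List.index? (t.map (pvScore text)) best ≠ none from fun hn =>
            (List.idxOf?_eq_none_iff.mp (by rwa [PySem.List.index?_eq_idxOf?] at hn)) hbmem)
        rw [hj, pvIdx_cons hbfp hj]
        have hjlt : j < t.length := pvIdx_lt hj
        simp [List.getD_eq_getElem?_getD, List.getElem?_eq_getElem hjlt]
    · rw [if_neg hgt, ih, show max h (pvScore text p) = h from by omega]
      set fp := pvScore text p with hfp
      set best := (t.map (pvScore text)).foldl max h with hb
      have hleh : h ≤ best := (PySem.List.le_foldl_max _ _).1
      by_cases hbh : best = h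
      · rw [if_pos hbh, if_pos hbh]
      · rw [if_neg hbh, if_neg hbh]
        have hbfp : ¬ best = fp := by omega
        have hbmem : best ∈ t.map (pvScore text) := (PySem.List.foldl_max_mem _ _).resolve_left hbh
        obtain ⟨j, hj⟩ := Option.ne_none_iff_exists'.mp
          (show PySem.List.index? (t.map (pvScore text)) best ≠ none from fun hn =>
            (List.idxOf?_eq_none_iff.mp (by rwa [PySem.List.index?_eq_idxOf?] at hn)) hbmem)
        rw [hj, pvIdx_cons hbfp hj]
        have hjlt : j < t.length := pvIdx_lt hj
        simp [List.getD_eq_getElem?_getD, List.getElem?_eq_getElem hjlt]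

-- ===== VERDICT (by name: the statement is the Claim_ definition above) =====
theorem match_subcategory_py_spec : Claim_equal_match_subcategory_py := by
  intro text subcategories default _
  unfold Spec_match_subcategory_py match_subcategory_py match_subcategory_py_alt
  have hloop := congrArg Prod.fst (pvLoop_eq text subcategories default 0)
  rw [hloop]
  cases subcategories with
  | nil => simp
  | cons p t =>
    have h0 : max (0:Int) (pvScore text p) = pvScore text p := by
      have : (0:Int) <= pvScore text p := Int.natCast_nonneg _
      omega
    simp only [List.map_cons, List.foldl_cons, PySem.List.max?_id_cons, h0]
    simp only [pvScore]
    rfl
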